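-- pv_equiv track=rewrite | github.com/sciona/sciona-atoms | src/sciona/atoms/provider_inventory.py | _find_anchor
-- ===== SOURCE A (Python) =====
-- from typing import Iterable, Sequence
--
-- def _find_anchor(parts: Sequence[str], anchor: Sequence[str]) -> int | None:
--     width = len(anchor)
--     if width == 0 or len(parts) < width:
--         return None
--     for index in range(len(parts) - width + 1):
--         if tuple(parts[index : index + width]) == tuple(anchor):
--             return index
--     return None
-- ===== SOURCE B (Python) =====
-- def _find_anchor(parts, anchor):
--     m = len(anchor)
--     n = len(parts)
--     if m == 0 or n < m:
--         return None
--     MOD = 1000000007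
--     BASE = 911382323
--
--     def shash(s):
--         h = 0
--         for ch in s:
--             h = (h * 131 + ord(ch)) % MOD
--         return h
--
--     hs = [shash(s) for s in parts]
--     ah = 0
--     for s in anchor:
--         ah = (ah * BASE + shash(s)) % MOD
--     wh = 0
--     for v in hs[:m]:
--         wh = (wh * BASE + v) % MOD
--     pow_top = 1
--     for _ in range(m - 1):
--         pow_top = (pow_top * BASE) % MOD
--     anchor_list = list(anchor)
--     for i in range(n - m + 1):
--         if wh == ah and list(parts[i:i + m]) == anchor_list:
--             return i
--         if i + m < n:
--             wh = ((wh - hs[i] * pow_top) * BASE + hs[i + m]) % MOD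
--     return None
-- ===== Notes on version B (the rewrite author's own statement) =====
-- stated objective: alternative
-- what changed: B is a Rabin-Karp matcher: it hashes every element once, compares a rolling polynomial window hash against the anchor's hash, and verifies the window only on a hash hit, instead of A's direct window-by-window sequence comparison; expected O(n+m) vs A's O(n*m) worst case, though on random inputs A's compares also fail early so no timing run speed is claimed.
import Mathlib
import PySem

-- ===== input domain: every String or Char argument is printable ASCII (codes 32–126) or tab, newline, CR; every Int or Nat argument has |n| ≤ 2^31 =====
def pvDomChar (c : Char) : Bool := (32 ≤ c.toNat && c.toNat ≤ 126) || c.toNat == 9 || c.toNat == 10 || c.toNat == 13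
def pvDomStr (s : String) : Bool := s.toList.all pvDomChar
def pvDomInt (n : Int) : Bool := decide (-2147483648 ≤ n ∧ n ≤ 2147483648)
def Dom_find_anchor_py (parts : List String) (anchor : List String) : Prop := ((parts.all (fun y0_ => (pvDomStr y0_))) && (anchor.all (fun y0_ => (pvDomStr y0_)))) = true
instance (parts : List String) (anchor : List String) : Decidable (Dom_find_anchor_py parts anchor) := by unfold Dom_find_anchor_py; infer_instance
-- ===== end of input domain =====

-- B re-implements the search as a Rabin–Karp matcher (per-element hashes + rolling polynomial window hash,
-- verify on a hash hit) instead of A's direct window-by-window comparison; alternative algorithm, no speed claim.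


-- ===== PORT A =====
-- literal port of _find_anchor: scan every index, compare the full window slice with the anchor
def find_anchor_py (parts : List String) (anchor : List String) : Option Int :=
  let width : Int := anchor.length
  if width == 0 || (parts.length : Int) < width then none
  else
    (PySem.List.pyRange 0 ((parts.length : Int) - width + 1) 1).find?
      (fun index => PySem.List.slice parts (some index) (some (index + width)) == anchor)

-- ===== PORT B =====
-- Source B's shash: polynomial hash of one string's characters
def pvShash (s : String) : Int :=
  s.toList.foldl (fun h c => (h * 131 + (c.toNat : Int)) % 1000000007) 0

def pvRkLoop (parts anchor : List String) (hs : List Int) (ah pw m n : Int) :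
    List Int → Int → Option Int
  | [], _ => none
  | i :: rest, wh =>
    if wh == ah && (PySem.List.slice parts (some i) (some (i + m)) == anchor) then some i
    else
      pvRkLoop parts anchor hs ah pw m n rest
        (if i + m < n then
          ((wh - PySem.List.pyGetD hs i 0 * pw) * 911382323 + PySem.List.pyGetD hs (i + m) 0) % 1000000007
        else wh)

-- port of Source B: Rabin–Karp — element hashes hs, anchor hash ah, rolling window hash wh, verify on a hit
def find_anchor_py_alt (parts : List String) (anchor : List String) : Option Int :=
  let m : Int := anchor.length
  let n : Int := parts.length
  if m == 0 || n < m then none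
  else
    let hs := parts.map pvShash
    let ah := anchor.foldl (fun a s => (a * 911382323 + pvShash s) % 1000000007) 0
    let wh0 := (PySem.List.slice hs none (some m)).foldl
      (fun a v => (a * 911382323 + v) % 1000000007) 0
    let pw := (PySem.List.pyRange 0 (m - 1) 1).foldl (fun p _ => (p * 911382323) % 1000000007) 1
    pvRkLoop parts anchor hs ah pw m n (PySem.List.pyRange 0 (n - m + 1) 1) wh0

-- ===== PRECONDITION & SPEC =====
def Spec_find_anchor_py (parts : List String) (anchor : List String) (out : Option Int) : Prop := out = find_anchor_py_alt parts anchor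
instance (parts : List String) (anchor : List String) (out : Option Int) : Decidable (Spec_find_anchor_py parts anchor out) := by unfold Spec_find_anchor_py; infer_instance

-- ===== CLAIM (what is proved, stated in full; the proofs are below) =====
def Claim_equal_find_anchor_py : Prop := ∀ (parts : List String) (anchor : List String), Dom_find_anchor_py parts anchor → Spec_find_anchor_py parts anchor (find_anchor_py parts anchor)

-- ===== LEMMAS AND PROOFS =====

-- hash of a list of element hashes (the fold Source B performs for ah / wh), and its exact image in ZMod
def pvLH (l : List Int) : Int := l.foldl (fun a v => (a * 911382323 + v) % 1000000007) 0
def pvPoly (l : List Int) : ZMod 1000000007 :=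
  (l.map (fun v => ((v : Int) : ZMod 1000000007))).foldl (fun a v => a * 911382323 + v) 0

theorem pv_cast_mod (a : Int) :
    ((a % 1000000007 : Int) : ZMod 1000000007) = (a : ZMod 1000000007) := by
  have h := ZMod.intCast_mod a 1000000007
  norm_num at h
  exact h

theorem pvLH_range (l : List Int) : 0 ≤ pvLH l ∧ pvLH l < 1000000007 := by
  have key : ∀ (l : List Int) (a : Int), 0 ≤ a → a < 1000000007 →
      0 ≤ l.foldl (fun a v => (a * 911382323 + v) % 1000000007) a ∧
      l.foldl (fun a v => (a * 911382323 + v) % 1000000007) a < 1000000007 := by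
    intro l
    induction l with
    | nil => intro a h1 h2; exact ⟨h1, h2⟩
    | cons x xs ih =>
      intro a _ _
      simp only [List.foldl_cons]
      exact ih _ (Int.emod_nonneg _ (by norm_num)) (Int.emod_lt_of_pos _ (by norm_num))
  exact key l 0 le_rfl (by norm_num)

theorem pvLH_cast (l : List Int) : ((pvLH l : Int) : ZMod 1000000007) = pvPoly l := by
  have key : ∀ (l : List Int) (a : Int),
      ((l.foldl (fun a v => (a * 911382323 + v) % 1000000007) a : Int) : ZMod 1000000007)
        = (l.map (fun v => ((v : Int) : ZMod 1000000007))).foldl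
            (fun a v => a * 911382323 + v) ((a : Int) : ZMod 1000000007) := by
    intro l
    induction l with
    | nil => intro a; rfl
    | cons x xs ih =>
      intro a
      simp only [List.foldl_cons, List.map_cons]
      rw [ih, pv_cast_mod]
      push_cast
      ring_nf
  simpa [pvLH, pvPoly] using key l 0
theorem pv_foldl_shift (L : List (ZMod 1000000007)) (a : ZMod 1000000007) :
    L.foldl (fun a v => a * 911382323 + v) a
      = a * 911382323 ^ L.length + L.foldl (fun a v => a * 911382323 + v) 0 := by
  induction L generalizing a with
  | nil => simp
  | cons x xs ih =>
    simp only [List.foldl_cons, List.length_cons]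
    rw [ih (a * 911382323 + x), ih (0 * 911382323 + x)]
    ring

theorem pvPoly_cons (x : Int) (l : List Int) :
    pvPoly (x :: l) = (x : ZMod 1000000007) * 911382323 ^ l.length + pvPoly l := by
  unfold pvPoly
  simp only [List.map_cons, List.foldl_cons]
  rw [pv_foldl_shift]
  simp [List.length_map]
theorem pvPoly_append_singleton (l : List Int) (z : Int) :
    pvPoly (l ++ [z]) = pvPoly l * 911382323 + (z : ZMod 1000000007) := by
  unfold pvPoly
  rw [List.map_append, List.foldl_append]
  rfl

theorem pv_int_eq (a b : Int) (ha : 0 ≤ a ∧ a < 1000000007) (hb : 0 ≤ b ∧ b < 1000000007)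
    (h : (a : ZMod 1000000007) = (b : ZMod 1000000007)) : a = b := by
  have := (ZMod.intCast_eq_intCast_iff a b 1000000007).mp (by exact_mod_cast h)
  have h2 : a % (1000000007 : Int) = b % (1000000007 : Int) := by exact_mod_cast this
  rwa [Int.emod_eq_of_lt ha.1 (by exact_mod_cast ha.2), Int.emod_eq_of_lt hb.1 (by exact_mod_cast hb.2)] at h2

theorem pv_roll (x z : Int) (ys : List Int) (pw : Int)
    (hpw : (pw : ZMod 1000000007) = 911382323 ^ ys.length) :
    pvLH (ys ++ [z]) = ((pvLH (x :: ys) - x * pw) * 911382323 + z) % 1000000007 := by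
  apply pv_int_eq _ _ (pvLH_range _)
    ⟨Int.emod_nonneg _ (by norm_num), Int.emod_lt_of_pos _ (by norm_num)⟩
  rw [pvLH_cast, pv_cast_mod, pvPoly_append_singleton]
  push_cast
  rw [pvLH_cast, pvPoly_cons, hpw]
  ring

theorem pv_pw_cast (k : Nat) :
    (((PySem.List.pyRange 0 (k : Int) 1).foldl (fun p _ => (p * 911382323) % 1000000007) 1 : Int)
      : ZMod 1000000007) = 911382323 ^ k := by
  induction k with
  | zero => simp [PySem.List.pyRange_one_eq_nil]
  | succ k ih =>
    have h : ((k : Int) + 1) = ((k + 1 : Nat) : Int) := by push_cast; ring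
    rw [← h, PySem.List.pyRange_one_succ_right (a := 0) (b := (k : Int)) (Int.natCast_nonneg k), List.foldl_append]
    simp only [List.foldl_cons, List.foldl_nil]
    rw [pv_cast_mod]
    push_cast
    rw [ih]
    ring

-- main loop invariant: with wh the true hash of the window at i, B's loop is exactly A's naive find?
theorem pv_loop_spec (parts anchor : List String) (mN : Nat)
    (hm : 1 ≤ mN) (hmn : mN ≤ parts.length)
    (pw : Int) (hpw : (pw : ZMod 1000000007) = 911382323 ^ (mN - 1)) :
    ∀ (fuel : Nat) (i : Nat) (wh : Int),
      fuel = (parts.length - mN + 1 - i) →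
      (i < parts.length - mN + 1 → wh = pvLH (((parts.drop i).take mN).map pvShash)) →
      pvRkLoop parts anchor (parts.map pvShash)
          (pvLH (anchor.map pvShash)) pw (mN : Int) (parts.length : Int)
          (PySem.List.pyRange (i : Int) ((parts.length : Int) - mN + 1) 1) wh
        = (PySem.List.pyRange (i : Int) ((parts.length : Int) - mN + 1) 1).find?
            (fun j => PySem.List.slice parts (some j) (some (j + mN)) == anchor) := by
  intro fuel
  induction fuel with
  | zero =>
    intro i wh hf _
    have hnil : PySem.List.pyRange (i : Int) ((parts.length : Int) - mN + 1) 1 = [] := by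
      apply PySem.List.pyRange_one_eq_nil
      omega
    rw [hnil]
    rfl
  | succ fuel ih =>
    intro i wh hf hwh
    have hilt : i < parts.length - mN + 1 := by omega
    obtain ⟨m', rfl⟩ : ∃ m', mN = m' + 1 := ⟨mN - 1, by omega⟩
    have hcons : PySem.List.pyRange (i : Int) ((parts.length : Int) - (m' + 1 : Nat) + 1) 1
        = (i : Int) :: PySem.List.pyRange ((i : Int) + 1) ((parts.length : Int) - (m' + 1 : Nat) + 1) 1 := by
      apply PySem.List.pyRange_one_cons
      omega
    have hslice : PySem.List.slice parts (some (i : Int)) (some ((i : Int) + (m' + 1 : Nat)))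
        = (parts.drop i).take (m' + 1) := PySem.List.slice_natCast_add parts i (m' + 1)
    have hcast1 : ((i : Int) + 1) = ((i + 1 : Nat) : Int) := by push_cast; ring
    rw [hcons]
    simp only [pvRkLoop]
    have hslice' := hslice
    push_cast at hslice'
    by_cases heq : ((parts.drop i).take (m' + 1) == anchor) = true
    · have hweq : wh = pvLH (anchor.map pvShash) := by
        rw [hwh hilt, (beq_iff_eq).mp heq]
      have hp : (fun (j : Int) => PySem.List.slice parts (some j) (some (j + ((m' + 1 : Nat) : Int))) == anchor) (i : Int) = true := by
        simp only [hslice]; exact heq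
      rw [if_pos (by simp [hslice', heq, hweq]), List.find?_cons_of_pos (p := fun (j : Int) => PySem.List.slice parts (some j) (some (j + ((m' + 1 : Nat) : Int))) == anchor) hp]
    · have hp : ¬ ((fun (j : Int) => PySem.List.slice parts (some j) (some (j + ((m' + 1 : Nat) : Int))) == anchor) (i : Int) = true) := by
        simp only [hslice]; exact heq
      rw [if_neg (by simp [hslice', heq]), List.find?_cons_of_neg (p := fun (j : Int) => PySem.List.slice parts (some j) (some (j + ((m' + 1 : Nat) : Int))) == anchor) hp, hcast1]
      apply ih
      · omega
      · -- invariant for i+1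
        intro hlt1
        have hguard : ((i : Int) + (m' + 1 : Nat) < (parts.length : Int)) := by
          push_cast; omega
        rw [if_pos hguard]
        -- element facts
        have hiL : i < parts.length := by omega
        have himL : i + (m' + 1) < parts.length := by omega
        -- lookups
        have hiL' : i < (parts.map pvShash).length := by simpa using hiL
        have himL' : i + (m' + 1) < (parts.map pvShash).length := by simpa using himL
        have hg1 : PySem.List.pyGetD (parts.map pvShash) (i : Int) 0 = pvShash parts[i] := by
          rw [PySem.List.pyGetD_natCast, List.getD_eq_getElem _ _ hiL']
          simp
        have hg2 : PySem.List.pyGetD (parts.map pvShash) ((i : Int) + (m' + 1 : Nat)) 0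
            = pvShash parts[i + (m' + 1)] := by
          have hc : ((i : Int) + (m' + 1 : Nat)) = ((i + (m' + 1) : Nat) : Int) := by push_cast; ring
          rw [hc, PySem.List.pyGetD_natCast, List.getD_eq_getElem _ _ himL']
          simp
        -- window decompositions
        have hwin : (parts.drop i).take (m' + 1)
            = parts[i] :: (parts.drop (i + 1)).take m' := by
          rw [← List.getElem_cons_drop hiL, List.take_succ_cons]
        have hlen' : m' < (parts.drop (i + 1)).length := by
          rw [List.length_drop]; omega
        have hwin2 : (parts.drop (i + 1)).take (m' + 1)
            = (parts.drop (i + 1)).take m' ++ [parts[i + (m' + 1)]] := by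
          rw [List.take_add_one]
          congr 1
          rw [List.getElem?_eq_getElem hlen', List.getElem_drop]
          simp [Nat.add_comm, Nat.add_left_comm]
        rw [hwh hilt, hwin, hwin2, List.map_cons, List.map_append, List.map_singleton]
        rw [hg1, hg2]
        have hys : (((parts.drop (i + 1)).take m').map pvShash).length = m' := by
          simp [List.length_take]; omega
        rw [pv_roll _ _ _ _ (by rw [hys]; simpa using hpw)]

theorem pv_main (parts anchor : List String) :
    find_anchor_py parts anchor = find_anchor_py_alt parts anchor := by
  unfold find_anchor_py find_anchor_py_alt
  by_cases hc : (((anchor.length : Int)) == 0 || decide ((parts.length : Int) < (anchor.length : Int))) = true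
  · rw [if_pos hc, if_pos hc]
  · rw [if_neg hc, if_neg hc]
    simp only [Bool.or_eq_true, beq_iff_eq, decide_eq_true_eq, not_or] at hc
    obtain ⟨h0, hlt⟩ := hc
    have hm : 1 ≤ anchor.length := by
      rcases Nat.eq_zero_or_pos anchor.length with h | h
      · exact absurd (by exact_mod_cast h) h0
      · exact h
    have hmn : anchor.length ≤ parts.length := by
      have := not_lt.mp hlt; exact_mod_cast this
    have hah : anchor.foldl (fun a s => (a * 911382323 + pvShash s) % 1000000007) 0
        = pvLH (anchor.map pvShash) := by
      unfold pvLH; rw [List.foldl_map]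
    have hwh0 : (PySem.List.slice (parts.map pvShash) none (some (anchor.length : Int))).foldl
          (fun a v => (a * 911382323 + v) % 1000000007) 0
        = pvLH (((parts.drop 0).take anchor.length).map pvShash) := by
      rw [PySem.List.slice_to_natCast, ← List.map_take]
      simp only [List.drop_zero]
      rfl
    have hcast : ((anchor.length : Int) - 1) = ((anchor.length - 1 : Nat) : Int) := by
      push_cast [hm]; omega
    have hpw' : ((((PySem.List.pyRange 0 ((anchor.length : Int) - 1) 1).foldl
          (fun p _ => (p * 911382323) % 1000000007) 1) : Int) : ZMod 1000000007)
        = 911382323 ^ (anchor.length - 1) := by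
      rw [hcast]; exact pv_pw_cast (anchor.length - 1)
    have hloop := pv_loop_spec parts anchor anchor.length hm hmn _ hpw'
      (parts.length - anchor.length + 1 - 0) 0 _ rfl (fun _ => hwh0)
    simp only [Nat.cast_zero] at hloop
    rw [hah]
    exact hloop.symm

-- ===== VERDICT (by name: the statement is the Claim_ definition above) =====
theorem find_anchor_py_spec : Claim_equal_find_anchor_py := by
  intro parts anchor _
  unfold Spec_find_anchor_py
  exact pv_main parts anchor
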